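-- pv_equiv track=rewrite | github.com/bertrand-maujean/mpm | src/compile_messages.py | cherche_lang
-- ===== SOURCE A (Python) =====
-- messages = []
--
-- def cherche_lang(messages):
--     ensemble_codes_lang = set();
--     for m in messages:
--         for l in m["msg"]:
--             ensemble_codes_lang.add(l["lang"]);
--
--     result = []
--     for c in ensemble_codes_lang:
--         result.append(c)
--
--     result.sort()
--
--     return result
-- ===== SOURCE B (Python) =====
-- def _dedup(xs):
--     # xs sorted; remove consecutive duplicates recursively
--     if len(xs) >= 2 and xs[0] == xs[1]:
--         return _dedup(xs[1:])
--     if xs: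
--         return [xs[0]] + _dedup(xs[1:])
--     return []
--
-- def cherche_lang(messages):
--     langs = sorted(l["lang"] for m in messages for l in m["msg"])
--     return _dedup(langs)
-- ===== Notes on version B (the rewrite author's own statement) =====
-- stated objective: alternative
-- what changed: B gathers every code by a flat comprehension, sorts the whole list once, and removes consecutive duplicates with a recursive dedup helper, instead of A's dedup-into-a-set during nested loops followed by copy-out and sort.
import Mathlib
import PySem

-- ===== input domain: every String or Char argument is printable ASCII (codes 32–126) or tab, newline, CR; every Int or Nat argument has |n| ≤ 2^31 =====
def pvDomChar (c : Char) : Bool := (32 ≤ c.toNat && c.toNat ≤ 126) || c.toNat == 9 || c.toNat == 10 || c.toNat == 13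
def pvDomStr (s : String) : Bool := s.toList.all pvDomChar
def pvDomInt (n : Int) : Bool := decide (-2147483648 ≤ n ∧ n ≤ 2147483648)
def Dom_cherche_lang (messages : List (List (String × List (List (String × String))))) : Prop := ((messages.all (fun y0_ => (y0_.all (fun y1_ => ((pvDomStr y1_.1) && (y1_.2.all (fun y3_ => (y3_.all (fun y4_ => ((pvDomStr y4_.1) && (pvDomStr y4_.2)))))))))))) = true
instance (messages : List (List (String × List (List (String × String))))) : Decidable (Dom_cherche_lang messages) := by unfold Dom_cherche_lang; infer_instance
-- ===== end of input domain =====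

-- B gathers the codes with one flat comprehension, sorts once, then strips consecutive
-- duplicates with a recursive helper — instead of A's dedup-into-a-set then copy-out then sort.
-- ===== PORT A =====
-- m["msg"] / l["lang"] raise KeyError on a missing key; Pre_ excludes exactly those inputs
-- (the .getD fallback is never reached inside Pre_).
def cherche_lang (messages : List (List (String × List (List (String × String))))) : List String :=
  let s : PySem.Set String := messages.foldl (fun s m =>
      ((PySem.Dict.get? ⟨m⟩ "msg").getD []).foldl (fun s l =>
        PySem.Set.add s ((PySem.Dict.get? (⟨l⟩ : PySem.Dict String String) "lang").getD "")) s) PySem.Set.empty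
  let result := s.foldl (fun r c => r ++ [c]) []
  PySem.List.sorted result (fun x => x) false

-- ===== PORT B =====
-- _dedup: on a sorted list, drop an element equal to its successor, else keep it.
def pvDedup : List String → List String
  | x :: y :: t => if x = y then pvDedup (y :: t) else [x] ++ pvDedup (y :: t)
  | [x] => [x]
  | [] => []

def cherche_lang_alt (messages : List (List (String × List (List (String × String))))) : List String :=
  let langs := PySem.List.sorted
    (messages.flatMap (fun m =>
      ((PySem.Dict.get? ⟨m⟩ "msg").getD []).map (fun l =>
        (PySem.Dict.get? (⟨l⟩ : PySem.Dict String String) "lang").getD "")))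
    (fun x => x) false
  pvDedup langs

-- ===== PRECONDITION & SPEC =====
-- Pre_: every message dict has key "msg" and every entry of it has key "lang"
-- (otherwise Python A raises KeyError).
def Pre_cherche_lang (messages : List (List (String × List (List (String × String))))) : Prop :=
  (messages.all (fun m =>
    (PySem.Dict.get? ⟨m⟩ "msg").isSome &&
    ((PySem.Dict.get? ⟨m⟩ "msg").getD []).all (fun l =>
      (PySem.Dict.get? (⟨l⟩ : PySem.Dict String String) "lang").isSome))) = true
instance (messages : List (List (String × List (List (String × String))))) : Decidable (Pre_cherche_lang messages) := by unfold Pre_cherche_lang; infer_instance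
def pvWitness_cherche_lang : (List (List (String × List (List (String × String))))) :=
  [[("msg", [[("lang", "fr")], [("lang", "en")]])], [("msg", [[("lang", "fr")]])]]
def Spec_cherche_lang (messages : List (List (String × List (List (String × String))))) (out : List String) : Prop := out = cherche_lang_alt messages
instance (messages : List (List (String × List (List (String × String))))) (out : List String) : Decidable (Spec_cherche_lang messages out) := by unfold Spec_cherche_lang; infer_instance

-- ===== CLAIM (what is proved, stated in full; the proofs are below) =====
def Claim_equal_cherche_lang : Prop := ∀ (messages : List (List (String × List (List (String × String))))), Dom_cherche_lang messages → Pre_cherche_lang messages → Spec_cherche_lang messages (cherche_lang messages)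

-- ===== LEMMAS AND PROOFS =====

-- the language codes contributed by one message (what both versions traverse)
def pvItems (m : List (String × List (List (String × String)))) : List String :=
  ((PySem.Dict.get? ⟨m⟩ "msg").getD []).map (fun l =>
    (PySem.Dict.get? (⟨l⟩ : PySem.Dict String String) "lang").getD "")

-- A's set accumulation is Set.update with the flat list of codes
theorem pvAfold (msgs : List (List (String × List (List (String × String)))))
    (s : PySem.Set String) :
    msgs.foldl (fun s m =>
      ((PySem.Dict.get? ⟨m⟩ "msg").getD []).foldl (fun s l =>
        PySem.Set.add s ((PySem.Dict.get? (⟨l⟩ : PySem.Dict String String) "lang").getD "")) s) s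
    = PySem.Set.update s (msgs.flatMap pvItems) := by
  induction msgs generalizing s with
  | nil => simp [PySem.Set.update]
  | cons m t ih =>
    simp only [List.foldl_cons, List.flatMap_cons]
    have h1 : ((PySem.Dict.get? (⟨m⟩ : PySem.Dict String (List (List (String × String)))) "msg").getD []).foldl (fun s l =>
        PySem.Set.add s ((PySem.Dict.get? (⟨l⟩ : PySem.Dict String String) "lang").getD "")) s
        = PySem.Set.update s (pvItems m) := by
      simp [PySem.Set.update, pvItems, List.foldl_map]
    rw [h1, ih]
    simp [PySem.Set.update, List.foldl_append]

-- pvDedup of a ≤-sorted list is strictly increasing and keeps exactly the same members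
theorem pvDedupInv : ∀ (xs : List String), xs.Pairwise (· ≤ ·) →
    (pvDedup xs).Pairwise (· < ·) ∧ ∀ a, a ∈ pvDedup xs ↔ a ∈ xs
  | [], _ => ⟨by simp [pvDedup], by simp [pvDedup]⟩
  | [x], _ => ⟨by simp [pvDedup], by simp [pvDedup]⟩
  | x :: y :: t, h => by
    have ih := pvDedupInv (y :: t) h.of_cons
    by_cases hxy : x = y
    · rw [pvDedup, if_pos hxy]
      refine ⟨ih.1, fun a => ?_⟩
      rw [ih.2 a]
      subst hxy
      constructor
      · intro ha; exact List.mem_cons_of_mem _ ha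
      · intro ha; rcases List.mem_cons.mp ha with rfl | ha
        · exact List.mem_cons_self
        · exact ha
    · rw [pvDedup, if_neg hxy]
      have hxle : ∀ b ∈ y :: t, x ≤ b := (List.pairwise_cons.mp h).1
      have hxlt : ∀ b ∈ pvDedup (y :: t), x < b := by
        intro b hb
        have hbmem : b ∈ y :: t := (ih.2 b).mp hb
        rcases List.mem_cons.mp hbmem with rfl | hbt
        · exact lt_of_le_of_ne (hxle b List.mem_cons_self) hxy
        · have hyb : y ≤ b := (List.pairwise_cons.mp h.of_cons).1 b hbt
          exact lt_of_lt_of_le (lt_of_le_of_ne (hxle y List.mem_cons_self) hxy) hyb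
      constructor
      · exact List.pairwise_cons.mpr ⟨hxlt, ih.1⟩
      · intro a
        simp only [List.singleton_append, List.mem_cons, ih.2 a]

-- the main algebraic fact: sorted(set(xs)) = pvDedup(sorted(xs))
theorem pvMain (xs : List String) :
    PySem.List.sorted (PySem.Set.ofList xs) (fun x => x) false
    = pvDedup (PySem.List.sorted xs (fun x => x) false) := by
  have hsorted : (PySem.List.sorted xs (fun x => x) false).Pairwise (· ≤ ·) := by
    simpa using PySem.List.sorted_pairwise (xs := xs) (key := fun x => x)
  have hinv := pvDedupInv (PySem.List.sorted xs (fun x => x) false) hsorted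
  apply PySem.List.sorted_eq_of_perm_of_pairwise_lt
  · refine (List.perm_ext_iff_of_nodup (hinv.1.imp fun h => ne_of_lt h)
      (PySem.Set.nodup_ofList xs)).mpr ?_
    intro a
    rw [hinv.2 a, PySem.Set.mem_ofList]
    simp [PySem.List.mem_sorted]
  · simpa using hinv.1

theorem pvUnfoldA (messages : List (List (String × List (List (String × String))))) :
    cherche_lang messages
    = PySem.List.sorted (PySem.Set.ofList (messages.flatMap pvItems)) (fun x => x) false := by
  simp only [cherche_lang]
  rw [pvAfold, PySem.List.foldl_append_singleton_eq_self]
  have h : PySem.Set.update PySem.Set.empty (messages.flatMap pvItems)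
      = PySem.Set.ofList (messages.flatMap pvItems) := by
    simp [PySem.Set.update, PySem.Set.ofList_eq_foldl, PySem.Set.empty]
  rw [h]
  simp

-- ===== VERDICT (by name: the statement is the Claim_ definition above) =====
theorem cherche_lang_spec : Claim_equal_cherche_lang := by
  intro messages _ _
  unfold Spec_cherche_lang cherche_lang_alt
  rw [pvUnfoldA, pvMain]
  rfl
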